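-- pv_equiv track=rewrite | github.com/swcurran/maintainers | generate-maintainers.py | render_conditionals
-- ===== SOURCE A (Python) =====
-- from typing import Dict, Any, Optional, Set, Tuple
--
-- def render_conditionals(text: str, vars: Dict[str, str]) -> str:
--     """
--     Process conditional blocks of the form:
--
--       {{ if var }}
--       ...
--       {{ else }}
--       ...
--       {{ endif }}
--
--     Truthiness is based on vars[var] being a non-empty string.
--     """
--     lines = text.splitlines()
--     out_lines = []
--
--     # Stack of (active, cond_value, in_else, parent_active)
--     stack: list[Tuple[bool, bool, bool, bool]] = []
--
--     for line in lines:
--         stripped = line.strip()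
--         if stripped.startswith("{{") and stripped.endswith("}}"):
--             inner = stripped[2:-2].strip()
--
--             if inner.startswith("if "):
--                 var_name = inner[3:].strip()
--                 cond_val = bool(vars.get(var_name, ""))
--                 parent_active = stack[-1][0] if stack else True
--                 active = parent_active and cond_val
--                 stack.append([active, cond_val, False, parent_active])  # type: ignore[list-item]
--                 continue
--
--             if inner == "else":
--                 if stack:
--                     active, cond_val, _, parent_active = stack[-1]  # type: ignore[misc]
--                     # For else: active if parent active and original cond was False
--                     new_active = parent_active and (not cond_val)
--                     stack[-1] = [new_active, cond_val, True, parent_active]  # type: ignore[list-item]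
--                 continue
--
--             if inner == "endif":
--                 if stack:
--                     stack.pop()
--                 continue
--
--         # Normal line
--         include = True
--         for active, _, _, _ in stack:
--             if not active:
--                 include = False
--                 break
--         if include:
--             out_lines.append(line)
--
--     return "\n".join(out_lines)
-- ===== SOURCE B (Python) =====
-- def render_conditionals(text: str, variables) -> str:
--     """Recursive-descent renderer: each {{ if }} block is rendered by a
--     recursive call that consumes lines up to its matching {{ endif }},
--     instead of maintaining an explicit frame stack scanned per line."""
--     lines = text.splitlines()
--
--     def block(i, parent, cond):
--         # Render the body of an if-frame starting at line index i.
--         # Returns (rendered lines, index just past the consumed endif).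
--         out = []
--         cur = parent and cond
--         while i < len(lines):
--             line = lines[i]
--             i += 1
--             s = line.strip()
--             if s.startswith("{{") and s.endswith("}}"):
--                 inner = s[2:-2].strip()
--                 if inner.startswith("if "):
--                     sub, i = block(i, cur, bool(variables.get(inner[3:].strip(), "")))
--                     out.extend(sub)
--                     continue
--                 if inner == "else":
--                     cur = parent and not cond
--                     continue
--                 if inner == "endif":
--                     return out, i
--             if cur:
--                 out.append(line)
--         return out, i
--
--     out = []
--     i = 0
--     while i < len(lines):
--         line = lines[i]
--         i += 1
--         s = line.strip()
--         if s.startswith("{{") and s.endswith("}}"):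
--             inner = s[2:-2].strip()
--             if inner.startswith("if "):
--                 sub, i = block(i, True, bool(variables.get(inner[3:].strip(), "")))
--                 out.extend(sub)
--                 continue
--             if inner == "else" or inner == "endif":
--                 continue
--         out.append(line)
--     return "\n".join(out)
-- ===== Notes on version B (the rewrite author's own statement) =====
-- stated objective: alternative
-- what changed: Replaces A's iterative frame stack (scanned in full for every emitted line) with a recursive-descent renderer: each {{ if }} block is rendered by a recursive call that consumes lines up to its matching {{ endif }}, so no stack of frames is materialised or scanned.
import Mathlib
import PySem

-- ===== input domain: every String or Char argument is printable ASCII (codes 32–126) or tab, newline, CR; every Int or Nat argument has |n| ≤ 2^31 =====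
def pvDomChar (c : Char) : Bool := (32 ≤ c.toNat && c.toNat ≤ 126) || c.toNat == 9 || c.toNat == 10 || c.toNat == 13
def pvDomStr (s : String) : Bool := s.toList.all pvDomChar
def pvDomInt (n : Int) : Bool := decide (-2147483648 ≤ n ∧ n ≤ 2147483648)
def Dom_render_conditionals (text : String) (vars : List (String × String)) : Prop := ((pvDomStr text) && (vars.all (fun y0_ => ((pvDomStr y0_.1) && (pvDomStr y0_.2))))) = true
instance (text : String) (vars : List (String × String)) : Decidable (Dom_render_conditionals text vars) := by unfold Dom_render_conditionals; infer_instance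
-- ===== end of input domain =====

-- B renders each {{ if }} block by a recursive-descent call that consumes lines up to
-- its matching {{ endif }}, replacing A's explicit per-line frame stack (alternative).

-- shared helper: vars.get(k, "") on the association list (first match, per the type convention)
def pvLookupD (vars : List (String × String)) (k : String) : String :=
  match vars with
  | [] => ""
  | (a, b) :: rest => if a == k then b else pvLookupD rest k

-- ===== PORT A =====
-- A's stack is kept top-at-head (Python appends/pops at the end; same frames, same order of visits).
-- Frame: (active, cond_val, in_else, parent_active).
def renderA_step (vars : List (String × String))
    (st : List (Bool × Bool × Bool × Bool) × List String) (line : String) :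
    List (Bool × Bool × Bool × Bool) × List String :=
  let stack := st.1
  let out := st.2
  let stripped := PySem.Str.strip line
  let normal : List (Bool × Bool × Bool × Bool) × List String :=
    (stack, if stack.all (fun f => f.1) then out ++ [line] else out)
  if PySem.Str.startswith stripped "{{" && PySem.Str.endswith stripped "}}" then
    let inner := PySem.Str.strip (PySem.Str.slice stripped (some 2) (some (-2)))
    if PySem.Str.startswith inner "if " then
      let var_name := PySem.Str.strip (PySem.Str.slice inner (some 3) none)
      let cond_val := !(PySem.Str.len (pvLookupD vars var_name) == 0)
      let parent_active := match stack with | [] => true | f :: _ => f.1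
      let active := parent_active && cond_val
      ((active, cond_val, false, parent_active) :: stack, out)
    else if inner == "else" then
      match stack with
      | [] => (stack, out)
      | (_, cond_val, _, parent_active) :: rest =>
          let new_active := parent_active && !cond_val
          ((new_active, cond_val, true, parent_active) :: rest, out)
    else if inner == "endif" then
      match stack with
      | [] => (stack, out)
      | _ :: rest => (rest, out)
    else normal
  else normal

def render_conditionals (text : String) (vars : List (String × String)) : String :=
  let lines := PySem.Str.splitlines text
  PySem.Str.join "\n" (lines.foldl (renderA_step vars) ([], [])).2

-- ===== PORT B =====
-- truthiness of vars.get(name, "")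
def pvTruthy (vars : List (String × String)) (name : String) : Bool :=
  !(PySem.Str.len (pvLookupD vars name) == 0)

-- the while-loop of Source B's `block`: remaining lines + (out, cur) loop state;
-- returns (rendered lines, lines remaining just past the consumed endif).
-- `fuel` only makes the nested recursion total (set to the total line count).
def renderBlockGo (vars : List (String × String)) :
    Nat → List String → Bool → Bool → Bool → List String → List String × List String
  | 0, lines, _, _, _, out => (out, lines)
  | _ + 1, [], _, _, _, out => (out, [])
  | fuel + 1, line :: rest, parent, cond, cur, out =>
    let s := PySem.Str.strip line
    if PySem.Str.startswith s "{{" && PySem.Str.endswith s "}}" then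
      let inner := PySem.Str.strip (PySem.Str.slice s (some 2) (some (-2)))
      if PySem.Str.startswith inner "if " then
        let cv := pvTruthy vars (PySem.Str.strip (PySem.Str.slice inner (some 3) none))
        let (sub, rest') := renderBlockGo vars fuel rest cur cv (cur && cv) out
        renderBlockGo vars fuel rest' parent cond cur sub
      else if inner == "else" then
        renderBlockGo vars fuel rest parent cond (parent && !cond) out
      else if inner == "endif" then
        (out, rest)
      else
        renderBlockGo vars fuel rest parent cond cur (if cur then out ++ [line] else out)
    else
      renderBlockGo vars fuel rest parent cond cur (if cur then out ++ [line] else out)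

-- Source B's top-level while loop
def renderTopGo (vars : List (String × String)) :
    Nat → List String → List String → List String
  | 0, _, out => out
  | _ + 1, [], out => out
  | fuel + 1, line :: rest, out =>
    let s := PySem.Str.strip line
    if PySem.Str.startswith s "{{" && PySem.Str.endswith s "}}" then
      let inner := PySem.Str.strip (PySem.Str.slice s (some 2) (some (-2)))
      if PySem.Str.startswith inner "if " then
        let cv := pvTruthy vars (PySem.Str.strip (PySem.Str.slice inner (some 3) none))
        let (sub, rest') := renderBlockGo vars fuel rest true cv (true && cv) out
        renderTopGo vars fuel rest' sub
      else if inner == "else" then renderTopGo vars fuel rest out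
      else if inner == "endif" then renderTopGo vars fuel rest out
      else renderTopGo vars fuel rest (out ++ [line])
    else
      renderTopGo vars fuel rest (out ++ [line])

def render_conditionals_alt (text : String) (vars : List (String × String)) : String :=
  let lines := PySem.Str.splitlines text
  PySem.Str.join "\n" (renderTopGo vars lines.length lines [])

-- ===== PRECONDITION & SPEC =====
def Spec_render_conditionals (text : String) (vars : List (String × String)) (out : String) : Prop := out = render_conditionals_alt text vars
instance (text : String) (vars : List (String × String)) (out : String) : Decidable (Spec_render_conditionals text vars out) := by unfold Spec_render_conditionals; infer_instance

-- ===== CLAIM =====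
def Claim_equal_render_conditionals : Prop := ∀ (text : String) (vars : List (String × String)), Dom_render_conditionals text vars → Spec_render_conditionals text vars (render_conditionals text vars)

-- ===== LEMMAS AND PROOFS =====

-- coherence of A's stack: each frame's stored parent_active is the conjunction
-- of the actives of the frames below it
def pvCoh : List (Bool × Bool × Bool × Bool) → Prop
  | [] => True
  | f :: r => f.2.2.2 = r.all (fun x => x.1) ∧ pvCoh r

theorem pvBlockLen (vars : List (String × String)) :
    ∀ (fuel : Nat) (lines : List String) (p c cur : Bool) (out : List String),
      (renderBlockGo vars fuel lines p c cur out).2.length ≤ lines.length := by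
  intro fuel
  induction fuel with
  | zero => intro lines p c cur out; simp [renderBlockGo]
  | succ n ih =>
    intro lines p c cur out
    cases lines with
    | nil => simp [renderBlockGo]
    | cons line rest =>
      simp only [renderBlockGo]
      split_ifs <;> simp only [List.length_cons]
      · set cv := pvTruthy vars (PySem.Str.strip (PySem.Str.slice
            (PySem.Str.strip
              (PySem.Str.slice (PySem.Str.strip line) (some 2) (some (-2))))
            (some 3) none)) with hcv
        rcases h1 : renderBlockGo vars n rest cur cv (cur && cv) out with ⟨sub, rest'⟩
        have h2 := ih rest cur cv (cur && cv) out
        rw [h1] at h2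
        calc (renderBlockGo vars n rest' p c cur sub).2.length
            ≤ rest'.length := ih rest' p c cur sub
          _ ≤ rest.length := h2
          _ ≤ rest.length + 1 := by omega
      · exact le_trans (ih rest p c _ out) (by omega)
      · simp
      · exact le_trans (ih rest p c cur _) (by omega)
      · exact le_trans (ih rest p c cur _) (by omega)
      · exact le_trans (ih rest p c cur _) (by omega)
      · exact le_trans (ih rest p c cur _) (by omega)

-- A's fold from a frame stack = B's block for the top frame, then A's fold on the rest
theorem pvBlockEq (vars : List (String × String)) :
    ∀ (fuel : Nat) (lines : List String), lines.length ≤ fuel →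
    ∀ (p c e cur : Bool) (rest : List (Bool × Bool × Bool × Bool)) (out : List String),
      p = rest.all (fun x => x.1) → cur = (p && cur) → pvCoh rest →
      (lines.foldl (renderA_step vars) ((cur, c, e, p) :: rest, out)).2 =
        ((renderBlockGo vars fuel lines p c cur out).2.foldl (renderA_step vars)
          (rest, (renderBlockGo vars fuel lines p c cur out).1)).2 := by
  intro fuel
  induction fuel with
  | zero =>
    intro lines hlen p c e cur rest out hp hcur hcoh
    interval_cases hl : lines.length
    · rw [List.length_eq_zero_iff.mp hl]; rfl
  | succ n ih =>
    intro lines hlen p c e cur rest out hp hcur hcoh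
    cases lines with
    | nil => rfl
    | cons line rls =>
      simp only [List.length_cons, Nat.add_le_add_iff_right] at hlen
      simp only [List.foldl_cons, renderBlockGo]
      by_cases hdir : (PySem.Str.startswith (PySem.Str.strip line) "{{"
          && PySem.Str.endswith (PySem.Str.strip line) "}}") = true
      · rw [if_pos hdir]
        by_cases hif : (PySem.Str.startswith (PySem.Str.strip
            (PySem.Str.slice (PySem.Str.strip line) (some 2) (some (-2)))) "if ") = true
        · -- nested if
          rw [if_pos hif]
          have hstep : renderA_step vars ((cur, c, e, p) :: rest, out) line =
              ((cur && pvTruthy vars (PySem.Str.strip (PySem.Str.slice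
                  (PySem.Str.strip
                    (PySem.Str.slice (PySem.Str.strip line) (some 2) (some (-2))))
                  (some 3) none)),
                pvTruthy vars (PySem.Str.strip (PySem.Str.slice
                  (PySem.Str.strip
                    (PySem.Str.slice (PySem.Str.strip line) (some 2) (some (-2))))
                  (some 3) none)), false, cur) :: (cur, c, e, p) :: rest, out) := by
            simp only [renderA_step, pvTruthy]
            rw [if_pos hdir, if_pos hif]
          rw [hstep]
          set cv := pvTruthy vars (PySem.Str.strip (PySem.Str.slice
              (PySem.Str.strip
                (PySem.Str.slice (PySem.Str.strip line) (some 2) (some (-2))))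
              (some 3) none)) with hcv
          have h1 := ih rls hlen cur cv false (cur && cv) ((cur, c, e, p) :: rest) out
            (by simp only [List.all_cons]
                rw [← hp]
                conv_lhs => rw [hcur]
                simp [Bool.and_comm])
            (by cases cur <;> simp)
            ⟨hp, hcoh⟩
          rw [h1]
          rcases hB1 : renderBlockGo vars n rls cur cv (cur && cv) out with ⟨sub, rest'⟩
          have hlen' : rest'.length ≤ n := by
            have := pvBlockLen vars n rls cur cv (cur && cv) out
            rw [hB1] at this; exact le_trans this hlen
          have h2 := ih rest' hlen' p c e cur rest sub hp hcur hcoh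
          simpa using h2
        · rw [if_neg hif]
          by_cases hel : (PySem.Str.strip
              (PySem.Str.slice (PySem.Str.strip line) (some 2) (some (-2))) == "else") = true
          · -- else
            rw [if_pos hel]
            have hstep : renderA_step vars ((cur, c, e, p) :: rest, out) line =
                ((p && !c, c, true, p) :: rest, out) := by
              simp only [renderA_step]
              rw [if_pos hdir, if_neg hif, if_pos hel]
            rw [hstep]
            exact ih rls hlen p c true (p && !c) rest out hp (by cases p <;> simp) hcoh
          · rw [if_neg hel]
            by_cases hend : (PySem.Str.strip
                (PySem.Str.slice (PySem.Str.strip line) (some 2) (some (-2))) == "endif") = true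
            · -- endif
              rw [if_pos hend]
              have hstep : renderA_step vars ((cur, c, e, p) :: rest, out) line =
                  (rest, out) := by
                simp only [renderA_step]
                rw [if_pos hdir, if_neg hif, if_neg hel, if_pos hend]
              rw [hstep]
            · -- other directive-looking line: normal
              rw [if_neg hend]
              have hinc : ((cur, c, e, p) :: rest).all (fun f => f.1) = cur := by
                simp only [List.all_cons]
                rw [← hp]
                conv_rhs => rw [hcur]
                exact Bool.and_comm _ _
              have hstep : renderA_step vars ((cur, c, e, p) :: rest, out) line =
                  ((cur, c, e, p) :: rest, if cur then out ++ [line] else out) := by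
                simp only [renderA_step]
                rw [if_pos hdir, if_neg hif, if_neg hel, if_neg hend]
                rw [hinc]
              rw [hstep]
              exact ih rls hlen p c e cur rest _ hp hcur hcoh
      · rw [if_neg hdir]
        have hinc : ((cur, c, e, p) :: rest).all (fun f => f.1) = cur := by
          simp only [List.all_cons]
          rw [← hp]
          conv_rhs => rw [hcur]
          exact Bool.and_comm _ _
        have hstep : renderA_step vars ((cur, c, e, p) :: rest, out) line =
            ((cur, c, e, p) :: rest, if cur then out ++ [line] else out) := by
          simp only [renderA_step]
          rw [if_neg hdir, hinc]
        rw [hstep]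
        exact ih rls hlen p c e cur rest _ hp hcur hcoh

-- A's fold from the empty stack = B's top-level loop
theorem pvTopEq (vars : List (String × String)) :
    ∀ (fuel : Nat) (lines : List String), lines.length ≤ fuel →
    ∀ (out : List String),
      (lines.foldl (renderA_step vars) ([], out)).2 = renderTopGo vars fuel lines out := by
  intro fuel
  induction fuel with
  | zero =>
    intro lines hlen out
    interval_cases hl : lines.length
    · rw [List.length_eq_zero_iff.mp hl]; rfl
  | succ n ih =>
    intro lines hlen out
    cases lines with
    | nil => rfl
    | cons line rls =>
      simp only [List.length_cons, Nat.add_le_add_iff_right] at hlen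
      simp only [List.foldl_cons, renderTopGo]
      by_cases hdir : (PySem.Str.startswith (PySem.Str.strip line) "{{"
          && PySem.Str.endswith (PySem.Str.strip line) "}}") = true
      · rw [if_pos hdir]
        by_cases hif : (PySem.Str.startswith (PySem.Str.strip
            (PySem.Str.slice (PySem.Str.strip line) (some 2) (some (-2)))) "if ") = true
        · rw [if_pos hif]
          set cv := pvTruthy vars (PySem.Str.strip (PySem.Str.slice
              (PySem.Str.strip
                (PySem.Str.slice (PySem.Str.strip line) (some 2) (some (-2))))
              (some 3) none)) with hcv
          have hstep : renderA_step vars (([] : List (Bool × Bool × Bool × Bool)), out) line =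
              ([(true && cv, cv, false, true)], out) := by
            simp only [renderA_step, pvTruthy, hcv]
            rw [if_pos hdir, if_pos hif]
          rw [hstep]
          have h1 := pvBlockEq vars n rls hlen true cv false (true && cv) [] out
            rfl (by cases cv <;> simp) trivial
          rw [h1]
          rcases hB1 : renderBlockGo vars n rls true cv (true && cv) out with ⟨sub, rest'⟩
          have hlen' : rest'.length ≤ n := by
            have := pvBlockLen vars n rls true cv (true && cv) out
            rw [hB1] at this; exact le_trans this hlen
          simpa using ih rest' hlen' sub
        · rw [if_neg hif]
          by_cases hel : (PySem.Str.strip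
              (PySem.Str.slice (PySem.Str.strip line) (some 2) (some (-2))) == "else") = true
          · rw [if_pos hel]
            have hstep : renderA_step vars (([] : List (Bool × Bool × Bool × Bool)), out) line =
                ([], out) := by
              simp only [renderA_step]
              rw [if_pos hdir, if_neg hif, if_pos hel]
            rw [hstep]
            exact ih rls hlen out
          · rw [if_neg hel]
            by_cases hend : (PySem.Str.strip
                (PySem.Str.slice (PySem.Str.strip line) (some 2) (some (-2))) == "endif") = true
            · rw [if_pos hend]
              have hstep : renderA_step vars (([] : List (Bool × Bool × Bool × Bool)), out) line =
                  ([], out) := by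
                simp only [renderA_step]
                rw [if_pos hdir, if_neg hif, if_neg hel, if_pos hend]
              rw [hstep]
              exact ih rls hlen out
            · rw [if_neg hend]
              have hstep : renderA_step vars (([] : List (Bool × Bool × Bool × Bool)), out) line =
                  ([], out ++ [line]) := by
                simp only [renderA_step]
                rw [if_pos hdir, if_neg hif, if_neg hel, if_neg hend]
                simp
              rw [hstep]
              exact ih rls hlen (out ++ [line])
      · rw [if_neg hdir]
        have hstep : renderA_step vars (([] : List (Bool × Bool × Bool × Bool)), out) line =
            ([], out ++ [line]) := by
          simp only [renderA_step]
          rw [if_neg hdir]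
          simp
        rw [hstep]
        exact ih rls hlen (out ++ [line])

-- ===== VERDICT =====
theorem render_conditionals_spec : Claim_equal_render_conditionals := by
  intro text vars _
  unfold Spec_render_conditionals render_conditionals render_conditionals_alt
  exact congrArg (PySem.Str.join "\n")
    (pvTopEq vars (PySem.Str.splitlines text).length (PySem.Str.splitlines text) le_rfl [])
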